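-- pv_equiv track=rewrite | github.com/DoctorDalek1963/WhatsApp-HTML-Formatter | oop-library.py | simple_format_to_html
-- ===== SOURCE A (Python) =====
-- formatDict = {'_': 'em', '*': 'strong', '~': 'del'}  # Dict of format chars with their HTML tags
--
-- def simple_format_to_html(string: str) -> str:
--     """Replace WhatsApp format characters with their HTML tags. Doesn't handle code blocks."""
--     first_tag = True
--     list_string = list(string)
--
--     for char, tag in formatDict.items():
--         if char in string and string.count(char) % 2 == 0:
--             for x, letter in enumerate(list_string):
--                 if letter == char:
--                     if first_tag:
--                         list_string[x] = f'<{tag}>'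
--                         first_tag = False
--                     else:
--                         list_string[x] = f'</{tag}>'
--                         first_tag = True
--
--     return ''.join(list_string)
-- ===== SOURCE B (Python) =====
-- formatDict = {'_': 'em', '*': 'strong', '~': 'del'}  # Dict of format chars with their HTML tags
--
--
-- def simple_format_to_html(string: str) -> str:
--     """Replace WhatsApp format characters with their HTML tags. Doesn't handle code blocks."""
--     active = {}
--     for char, tag in formatDict.items():
--         if char in string and string.count(char) % 2 == 0:
--             active[char] = tag
--
--     parity = {}
--     out = []
--     for ch in string:
--         tag = active.get(ch)
--         if tag is not None:
--             p = parity.get(ch, True)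
--             out.append(f'<{tag}>' if p else f'</{tag}>')
--             parity[ch] = not p
--         else:
--             out.append(ch)
--     return ''.join(out)
-- ===== Notes on version B (the rewrite author's own statement) =====
-- stated objective: alternative
-- what changed: B replaces A's three sequential in-place replacement sweeps over a mutable char list (one sweep per format char, with a shared toggling flag) by a single pass over the string that emits tokens, using a precomputed dict of active format chars and a per-char parity dict.
import Mathlib
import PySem

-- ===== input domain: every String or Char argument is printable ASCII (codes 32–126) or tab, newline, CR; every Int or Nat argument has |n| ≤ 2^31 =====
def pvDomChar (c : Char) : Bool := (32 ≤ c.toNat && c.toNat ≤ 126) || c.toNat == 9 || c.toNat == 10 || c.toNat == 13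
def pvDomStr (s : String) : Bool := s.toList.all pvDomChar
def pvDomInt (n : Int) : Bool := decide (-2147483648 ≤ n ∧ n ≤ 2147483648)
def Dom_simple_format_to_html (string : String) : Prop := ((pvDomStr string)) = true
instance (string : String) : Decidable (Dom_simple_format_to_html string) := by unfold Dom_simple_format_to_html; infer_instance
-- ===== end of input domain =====

-- B replaces A's three sequential in-place replacement sweeps over a mutable char list by one
-- pass over the string that emits tokens, using a precomputed dict of active format chars and a
-- per-char parity dict (objective: alternative single-pass decomposition, same asymptotic cost).

-- shared module-level constant of the Python file
def formatDict : List (Char × List Char) :=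
  [('_', ['e', 'm']), ('*', ['s', 't', 'r', 'o', 'n', 'g']), ('~', ['d', 'e', 'l'])]

-- f'<{tag}>' and f'</{tag}>' (both Python versions build these literally)
def openTag (tag : List Char) : List Char := '<' :: tag ++ ['>']
def closeTag (tag : List Char) : List Char := '<' :: '/' :: tag ++ ['>']

-- the guard 'char in string and string.count(char) % 2 == 0' (textually shared by A and B)
def fmtCond (s : List Char) (c : Char) : Bool :=
  PySem.Chars.isIn [c] s && decide (PySem.Chars.count s [c] % 2 = 0)

-- ===== PORT A =====
-- inner loop of A: walk the list, replacing every element equal to [char] by the open/close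
-- tag according to the toggling flag first_tag (Python mutates list_string at the visited index)
def stepA (c : Char) (o cl : List Char) : Bool → List (List Char) → Bool × List (List Char)
  | f, [] => (f, [])
  | f, x :: xs =>
    if x = [c] then
      let r := stepA c o cl (!f) xs
      (r.1, (if f then o else cl) :: r.2)
    else
      let r := stepA c o cl f xs
      (r.1, x :: r.2)

def simple_format_to_html (string : String) : String :=
  let s := string.toList
  let res := formatDict.foldl
    (fun (st : Bool × List (List Char)) q =>
      if fmtCond s q.1 then stepA q.1 (openTag q.2) (closeTag q.2) st.1 st.2 else st)
    (true, s.map (fun ch => [ch]))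
  String.mk res.2.flatten

-- ===== PORT B =====
def simple_format_to_html_alt (string : String) : String :=
  let s := string.toList
  let active : PySem.Dict Char (List Char) := formatDict.foldl
    (fun d q => if fmtCond s q.1 then d.insert q.1 q.2 else d) ⟨[]⟩
  let r := s.foldl
    (fun (st : List (List Char) × PySem.Dict Char Bool) ch =>
      match active.get? ch with
      | some tag =>
          let p := st.2.getD ch true
          (st.1 ++ [if p then openTag tag else closeTag tag], st.2.insert ch (!p))
      | none => (st.1 ++ [[ch]], st.2))
    ([], ⟨[]⟩)
  String.mk r.1.flatten

-- ===== PRECONDITION & SPEC =====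
def Spec_simple_format_to_html (string : String) (out : String) : Prop := out = simple_format_to_html_alt string
instance (string : String) (out : String) : Decidable (Spec_simple_format_to_html string out) := by unfold Spec_simple_format_to_html; infer_instance

-- ===== CLAIM (what is proved, stated in full; the proofs are below) =====
def Claim_equal_simple_format_to_html : Prop := ∀ (string : String), Dom_simple_format_to_html string → Spec_simple_format_to_html string (simple_format_to_html string)

-- ===== LEMMAS AND PROOFS =====

-- canonical form both ports are reduced to: render each char of the original string as a block,
-- looking its tag up in `acts` and toggling a parity function
def render (acts : PySem.Dict Char (List Char)) (p : Char → Bool) : List Char → List (List Char)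
  | [] => []
  | ch :: t =>
    match acts.get? ch with
    | some tag => (if p ch then openTag tag else closeTag tag) :: render acts (Function.update p ch (!p ch)) t
    | none => [ch] :: render acts p t

lemma render_empty (p : Char → Bool) (s : List Char) :
    render ⟨[]⟩ p s = s.map (fun ch => [ch]) := by
  induction s generalizing p with
  | nil => rfl
  | cons ch t ih => simp [render, PySem.Dict.get?, ih]

lemma openTag_ne_single (tag : List Char) (c : Char) : openTag tag ≠ [c] := by
  simp [openTag]
lemma closeTag_ne_single (tag : List Char) (c : Char) : closeTag tag ≠ [c] := by
  simp [closeTag]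

-- exact count of a single-char substring is the List.count
lemma count_go_single (c : Char) :
    ∀ (fuel : Nat) (s : List Char) (acc : Nat), s.length ≤ fuel →
      PySem.Chars.count.go [c] fuel s acc = acc + s.count c := by
  intro fuel
  induction fuel with
  | zero =>
    intro s acc h
    interval_cases hs : s.length
    · rw [List.length_eq_zero_iff] at hs; subst hs; simp [PySem.Chars.count.go]
  | succ n ih =>
    intro s acc h
    cases s with
    | nil => simp [PySem.Chars.count.go]
    | cons x t =>
      simp only [PySem.Chars.count.go]
      by_cases hx : x = c
      · subst hx
        have : List.isPrefixOf [x] (x :: t) = true := by simp [List.isPrefixOf]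
        simp only [this, if_true, List.length_cons, List.length_nil, List.drop_succ_cons, List.drop_zero]
        rw [ih t (acc + 1) (by simpa using h)]
        simp [List.count_cons]
        omega
      · have hcx : ¬ c = x := fun hcx => hx hcx.symm
        have : List.isPrefixOf [c] (x :: t) = false := by
          simp [List.isPrefixOf, beq_eq_false_iff_ne.mpr hcx]
        simp only [this, Bool.false_eq_true, if_false]
        rw [ih t acc (by simpa using h)]
        simp [List.count_cons, hcx, hx]

lemma count_single (s : List Char) (c : Char) : PySem.Chars.count s [c] = s.count c := by
  simp only [PySem.Chars.count, List.isEmpty_cons, Bool.false_eq_true, if_false]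
  simpa using count_go_single c s.length s 0 le_rfl

-- A's sweep for one fresh char over a rendered string extends the render dict
lemma stepA_render (c : Char) (tag : List Char) (acts : PySem.Dict Char (List Char))
    (hc : acts.get? c = none) :
    ∀ (s : List Char) (p : Char → Bool) (f : Bool),
      stepA c (openTag tag) (closeTag tag) f (render acts p s) =
      ((if s.count c % 2 = 0 then f else !f),
        render (acts.insert c tag) (Function.update p c f) s) := by
  intro s
  induction s with
  | nil => intro p f; simp [render, stepA]
  | cons ch t ih =>
    intro p f
    rcases h : acts.get? ch with _ | tg
    · by_cases hch : ch = c
      · subst hch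
        have hg : (acts.insert ch tag).get? ch = some tag := by
          rw [PySem.Dict.get?_insert]; simp
        simp only [render, h, hg, stepA, if_pos rfl]
        rw [ih p (!f)]
        refine Prod.ext ?_ (by simp [Function.update_self, Function.update_idem])
        rcases Nat.even_or_odd (t.count ch) with he | ho
        · have h0 : t.count ch % 2 = 0 := Nat.even_iff.mp he
          simp [List.count_cons, h0, Nat.add_mod]
        · have h1 : t.count ch % 2 = 1 := Nat.odd_iff.mp ho
          simp [List.count_cons, h1, Nat.add_mod]
      · -- plain char, not c
        have hg : (acts.insert c tag).get? ch = none := by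
          rw [PySem.Dict.get?_insert]; simp [hch, h]
        have hne : ([ch] : List Char) ≠ [c] := by simpa using hch
        simp only [render, h, hg, stepA, if_neg hne]
        rw [ih p f]
        refine Prod.ext (by simp [List.count_cons, hch]) (by simp)
    · -- a char already tagged in acts: its block is a tag, never [c]
      have hch : ch ≠ c := by
        intro hh; subst hh; rw [h] at hc; cases hc
      have hg : (acts.insert c tag).get? ch = some tg := by
        rw [PySem.Dict.get?_insert]; simp [hch, h]
      have hne : (if p ch then openTag tg else closeTag tg) ≠ [c] := by
        by_cases hp : p ch <;> simp [hp, openTag_ne_single, closeTag_ne_single]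
      simp only [render, h, hg, stepA, if_neg hne]
      rw [ih (Function.update p ch (!p ch)) f]
      have hp1 : Function.update p c f ch = p ch := Function.update_of_ne hch f p
      refine Prod.ext (by simp [List.count_cons, hch]) ?_
      simp only [hp1]
      congr 2
      rw [Function.update_comm hch]

-- A's outer loop over the format dict, from an all-true parity
lemma foldA_render (s : List Char) :
    ∀ (L : List (Char × List Char)) (acts : PySem.Dict Char (List Char)),
      (∀ q ∈ L, acts.get? q.1 = none) → (L.map Prod.fst).Nodup →
      L.foldl
        (fun (st : Bool × List (List Char)) q =>
          if fmtCond s q.1 then stepA q.1 (openTag q.2) (closeTag q.2) st.1 st.2 else st)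
        (true, render acts (fun _ => true) s)
      = (true,
         render (L.foldl (fun d q => if fmtCond s q.1 then d.insert q.1 q.2 else d) acts)
           (fun _ => true) s) := by
  intro L
  induction L with
  | nil => intro acts _ _; rfl
  | cons q rest ih =>
    intro acts hfresh hnodup
    have hq : acts.get? q.1 = none := hfresh q (List.mem_cons_self)
    by_cases hcond : fmtCond s q.1 = true
    · simp only [List.foldl_cons, hcond, if_true]
      have heven : s.count q.1 % 2 = 0 := by
        have := (Bool.and_eq_true _ _).mp hcond |>.2
        rw [count_single] at this
        simpa using this
      rw [stepA_render q.1 q.2 acts hq s (fun _ => true) true]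
      rw [if_pos heven]
      have hupd : Function.update (fun _ : Char => true) q.1 true = (fun _ => true) := by
        funext x; by_cases hx : x = q.1 <;> simp [hx]
      rw [hupd]
      rw [ih (acts.insert q.1 q.2) ?_ ?_]
      · intro r hr
        rw [PySem.Dict.get?_insert acts q.1 r.1 q.2]
        have hnotin : q.1 ∉ rest.map Prod.fst :=
          (List.nodup_cons.mp (by simpa using hnodup)).1
        have hne : r.1 ≠ q.1 := by
          intro hh
          exact hnotin (hh ▸ List.mem_map_of_mem hr)
        rw [if_neg hne]
        exact hfresh r (List.mem_cons_of_mem _ hr)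
      · simpa using (List.nodup_cons.mp (by simpa using hnodup)).2
    · simp only [List.foldl_cons, hcond]
      simp only [Bool.false_eq_true, if_false]
      exact ih acts (fun r hr => hfresh r (List.mem_cons_of_mem _ hr)) (by simpa using (List.nodup_cons.mp (by simpa using hnodup)).2)

-- B's single pass computes the render of its active dict
lemma foldB_render (active : PySem.Dict Char (List Char)) :
    ∀ (s : List Char) (acc : List (List Char)) (d : PySem.Dict Char Bool),
      (s.foldl
        (fun (st : List (List Char) × PySem.Dict Char Bool) ch =>
          match active.get? ch with
          | some tag =>
              let p := st.2.getD ch true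
              (st.1 ++ [if p then openTag tag else closeTag tag], st.2.insert ch (!p))
          | none => (st.1 ++ [[ch]], st.2))
        (acc, d)).1
      = acc ++ render active (fun ch => d.getD ch true) s := by
  intro s
  induction s with
  | nil => intro acc d; simp [render]
  | cons ch t ih =>
    intro acc d
    rcases h : active.get? ch with _ | tag
    · simp only [List.foldl_cons, h]
      rw [ih (acc ++ [[ch]]) d]
      simp [render, h]
    · simp only [List.foldl_cons, h]
      rw [ih _ _]
      simp only [render, h]
      have hfun : (fun x => (d.insert ch (!d.getD ch true)).getD x true)
          = Function.update (fun x => d.getD x true) ch (!(d.getD ch true)) := by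
        funext x
        rw [PySem.Dict.getD_insert]
        by_cases hx : x = ch
        · subst hx
          simp [Function.update_self, Bool.not_not]
        · simp [hx, Function.update_of_ne hx]
      rw [hfun]
      simp

lemma formatDict_keys_nodup : (formatDict.map Prod.fst).Nodup := by decide

-- ===== VERDICT (by name: the statement is the Claim_ definition above) =====
theorem simple_format_to_html_spec : Claim_equal_simple_format_to_html := by
  intro string _
  unfold Spec_simple_format_to_html simple_format_to_html simple_format_to_html_alt
  simp only []
  rw [foldB_render]
  rw [show (fun ch => (⟨[]⟩ : PySem.Dict Char Bool).getD ch true) = (fun _ : Char => true) by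
    funext x; simp [PySem.Dict.getD, PySem.Dict.get?]]
  rw [← render_empty (fun _ => true) string.toList]
  rw [foldA_render string.toList formatDict ⟨[]⟩ (fun q _ => PySem.Dict.get?_empty q.1) formatDict_keys_nodup]
  simp
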